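-- pv_equiv track=rewrite | github.com/ankikadey/Competetive-Coding-and-Interview-Questions | Unstop/TCS/MeasurementOfArray.py | calculate_measurement
-- ===== SOURCE A (Python) =====
-- MOD = 1000000007
--
-- def calculate_measurement(n, arr):
--     last_occurrence = {}
--     measurement = 0
--
--     for i in range(n):
--         last_occurrence[arr[i]] = i
--
--     for i in range(n):
--         sanity = i + last_occurrence[arr[i]]
--         measurement += sanity
--
--     return measurement % MOD
-- ===== SOURCE B (Python) =====
-- MOD = 1000000007
--
-- def calculate_measurement(n, arr):
--     if n <= 0:
--         return 0
--     last_occurrence = {}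
--     count = {}
--     for i in range(n):
--         e = arr[i]
--         last_occurrence[e] = i
--         count[e] = count.get(e, 0) + 1
--     total = n * (n - 1) // 2
--     for e, c in count.items():
--         total += last_occurrence[e] * c
--     return total % MOD
-- ===== Notes on version B (the rewrite author's own statement) =====
-- stated objective: alternative
-- what changed: Replaces A's second index-by-index pass (n iterations of i + last[arr[i]]) by the closed form n*(n-1)//2 for the index sum plus a single loop over the distinct elements adding last_occurrence[e]*count[e], with the count dict built in the same first pass.
import Mathlib
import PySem

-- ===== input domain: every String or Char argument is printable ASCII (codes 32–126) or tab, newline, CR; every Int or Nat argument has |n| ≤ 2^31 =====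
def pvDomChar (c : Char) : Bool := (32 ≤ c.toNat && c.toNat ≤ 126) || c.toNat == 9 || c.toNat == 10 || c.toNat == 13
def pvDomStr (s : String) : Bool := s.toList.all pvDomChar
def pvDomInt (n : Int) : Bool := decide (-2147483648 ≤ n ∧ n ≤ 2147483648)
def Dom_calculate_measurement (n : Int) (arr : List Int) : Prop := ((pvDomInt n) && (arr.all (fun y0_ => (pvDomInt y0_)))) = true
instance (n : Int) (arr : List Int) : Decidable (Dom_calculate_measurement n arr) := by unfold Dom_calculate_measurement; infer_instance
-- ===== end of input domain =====

-- B replaces A's second index pass by the closed form n*(n-1)//2 plus one loop over the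
-- distinct elements adding last_occurrence[e]*count[e]; same O(n) cost, different decomposition.


-- ===== PORT A =====
-- first loop of A: for i in range(n): last_occurrence[arr[i]] = i
def pvLastOccurrence (n : Int) (arr : List Int) : PySem.Dict Int Int :=
  (PySem.List.pyRange 0 n 1).foldl
    (fun d i => d.insert (PySem.List.pyGetD arr i 0) i) PySem.Dict.empty

def calculate_measurement (n : Int) (arr : List Int) : Int :=
  -- for i in range(n): measurement += i + last_occurrence[arr[i]]; return measurement % MOD
  PySem.Int.mod
    ((PySem.List.pyRange 0 n 1).foldl
      (fun m i => m + (i + (pvLastOccurrence n arr).getD (PySem.List.pyGetD arr i 0) 0)) 0)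
    1000000007

-- ===== PORT B =====
-- B's single pass: build last_occurrence and count together
def pvPass (n : Int) (arr : List Int) : PySem.Dict Int Int × PySem.Dict Int Int :=
  (PySem.List.pyRange 0 n 1).foldl
    (fun st i =>
      (st.1.insert (PySem.List.pyGetD arr i 0) i,
       st.2.insert (PySem.List.pyGetD arr i 0) (st.2.getD (PySem.List.pyGetD arr i 0) 0 + 1)))
    (PySem.Dict.empty, PySem.Dict.empty)

def calculate_measurement_alt (n : Int) (arr : List Int) : Int :=
  if n ≤ 0 then 0
  else
    -- total = n*(n-1)//2; for e, c in count.items(): total += last_occurrence[e]*c; return total % MOD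
    PySem.Int.mod
      ((pvPass n arr).2.items.foldl
        (fun t p => t + (pvPass n arr).1.getD p.1 0 * p.2)
        (PySem.Int.floordiv (n * (n - 1)) 2))
      1000000007

-- ===== PRECONDITION & SPEC =====
-- A (and B) raise IndexError iff arr[i] is accessed with i ≥ len(arr), i.e. iff n > len(arr).
def Pre_calculate_measurement (n : Int) (arr : List Int) : Prop := n ≤ (arr.length : Int)
instance (n : Int) (arr : List Int) : Decidable (Pre_calculate_measurement n arr) := by unfold Pre_calculate_measurement; infer_instance
def pvWitness_calculate_measurement : Int × List Int := (3, [5, 2, 5])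

def Spec_calculate_measurement (n : Int) (arr : List Int) (out : Int) : Prop := out = calculate_measurement_alt n arr
instance (n : Int) (arr : List Int) (out : Int) : Decidable (Spec_calculate_measurement n arr out) := by unfold Spec_calculate_measurement; infer_instance

-- ===== CLAIM (what is proved, stated in full; the proofs are below) =====
def Claim_equal_calculate_measurement : Prop := ∀ (n : Int) (arr : List Int), Dom_calculate_measurement n arr → Pre_calculate_measurement n arr → Spec_calculate_measurement n arr (calculate_measurement n arr)

-- ===== LEMMAS AND PROOFS =====

-- the list of values both programs read: [arr[i] for i in range(n)]
def pvVals (n : Int) (arr : List Int) : List Int :=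
  (PySem.List.pyRange 0 n 1).map (fun i => PySem.List.pyGetD arr i 0)

-- regrouping: a sum of g over xs equals the sum over the distinct elements of g·count
theorem pv_regroup (xs : List Int) (g : Int → Int) :
    ((PySem.Set.ofList xs).map (fun k => g k * (xs.count k : Int))).sum = (xs.map g).sum := by
  have hto : (PySem.Set.ofList xs : List Int).toFinset = xs.toFinset := by
    apply Finset.ext; intro a
    simp [List.mem_toFinset, PySem.Set.mem_ofList]
  rw [← List.sum_toFinset _ (PySem.Set.nodup_ofList xs), hto,
      Finset.sum_list_map_count xs g]
  apply Finset.sum_congr rfl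
  intro m _
  simp [mul_comm]

-- twice the sum of 0..m-1
theorem pv_sum2 (m : Nat) :
    ((List.range m).map (fun k : Nat => (k : Int))).sum * 2 = (m : Int) * ((m : Int) - 1) := by
  induction m with
  | zero => simp
  | succ k ih =>
    rw [List.range_succ, List.map_append, List.sum_append]
    simp only [List.map_cons, List.map_nil, List.sum_cons, List.sum_nil]
    push_cast
    push_cast at ih
    linear_combination ih

-- Gauss: sum of range(n) = n*(n-1)//2
theorem pv_gauss (n : Int) (hn : 0 < n) :
    ((PySem.List.pyRange 0 n 1).map id).sum = PySem.Int.floordiv (n * (n - 1)) 2 := by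
  rw [PySem.Int.floordiv_eq_ediv_of_pos (by omega), PySem.List.pyRange_one]
  have h0 : ((List.range (n - 0).toNat).map (fun k : Nat => ((0 : Int) + k))).map id
      = (List.range (n - 0).toNat).map (fun k : Nat => (k : Int)) := by
    simp
  rw [h0]
  have h2 := pv_sum2 (n - 0).toNat
  have hnm : (((n - 0).toNat : Int)) = n := by omega
  rw [hnm] at h2
  omega

theorem calc_eq (n : Int) (arr : List Int) (hn : 0 < n) :
    calculate_measurement n arr = calculate_measurement_alt n arr := by
  have hcnt : (PySem.List.pyRange 0 n 1).foldl
      (fun (d : PySem.Dict Int Int) i =>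
        d.insert (PySem.List.pyGetD arr i 0) (d.getD (PySem.List.pyGetD arr i 0) 0 + 1))
      PySem.Dict.empty = PySem.Dict.counter (pvVals n arr) := by
    rw [← PySem.Dict.foldl_insert_getD_add_one_eq_counter, pvVals, List.foldl_map]
  have hpass : pvPass n arr = (pvLastOccurrence n arr, PySem.Dict.counter (pvVals n arr)) := by
    unfold pvPass pvLastOccurrence
    rw [PySem.List.foldl_prod_mk
      (fun (d : PySem.Dict Int Int) i => d.insert (PySem.List.pyGetD arr i 0) i)
      (fun (d : PySem.Dict Int Int) i =>
        d.insert (PySem.List.pyGetD arr i 0) (d.getD (PySem.List.pyGetD arr i 0) 0 + 1)),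
      hcnt]
  unfold calculate_measurement calculate_measurement_alt
  rw [if_neg (by omega), hpass]
  set lo := pvLastOccurrence n arr with hlo
  simp only []
  congr 1
  -- A's measurement
  have hA : (PySem.List.pyRange 0 n 1).foldl
      (fun m i => m + (i + lo.getD (PySem.List.pyGetD arr i 0) 0)) 0
      = ((PySem.List.pyRange 0 n 1).map id).sum
        + ((pvVals n arr).map (fun x => lo.getD x 0)).sum := by
    rw [PySem.List.foldl_add, pvVals, List.map_map]
    rw [← PySem.List.sum_map_add_int]
    simp [Function.comp]
  rw [hA, pv_gauss n hn]
  -- B's total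
  rw [PySem.List.foldl_add, PySem.Dict.items_counter, List.map_map]
  have hcomp : ((PySem.Set.ofList (pvVals n arr) : List Int).map
      ((fun p : Int × Int => lo.getD p.1 0 * p.2) ∘
        (fun k => (k, ((pvVals n arr).count k : Int))))).sum
      = ((PySem.Set.ofList (pvVals n arr) : List Int).map
        (fun k => lo.getD k 0 * ((pvVals n arr).count k : Int))).sum := by
    simp [Function.comp_def]
  rw [hcomp, pv_regroup (pvVals n arr) (fun x => lo.getD x 0)]

theorem calc_eq_nonpos (n : Int) (arr : List Int) (hn : n ≤ 0) :
    calculate_measurement n arr = calculate_measurement_alt n arr := by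
  unfold calculate_measurement calculate_measurement_alt
  rw [if_pos hn]
  have h : PySem.List.pyRange 0 n 1 = [] := by
    rw [PySem.List.pyRange_one]
    have h0 : (n - 0).toNat = 0 := by omega
    rw [h0]; simp
  rw [h]
  simp only [List.foldl_nil]
  decide

-- ===== VERDICT (by name: the statement is the Claim_ definition above) =====
theorem calculate_measurement_spec : Claim_equal_calculate_measurement := by
  intro n arr _ _
  unfold Spec_calculate_measurement
  by_cases hn : 0 < n
  · exact calc_eq n arr hn
  · exact calc_eq_nonpos n arr (by omega)
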